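-- pv_equiv track=rewrite | github.com/wjonesusna2012/GoogleCodeJam2008 | QualRound20081A.py | bestEngine
-- ===== SOURCE A (Python) =====
-- def bestEngine(QueryArray, startIndex, EngineSet):
--     engineSetCopy = set(EngineSet)  # Copy the search Engine Set to allow changes without loss of data
--     while startIndex < len(QueryArray) and len(engineSetCopy) > 0:  # Iterate through all queries processed or 0 engines
--         if QueryArray[startIndex] in engineSetCopy:
--             engineSetCopy.remove(QueryArray[startIndex])  # Remove search engines from the EngineSet until 1 remains
--         startIndex += 1
--     if startIndex == len(QueryArray):  # We have iterated through the entire QueryArray without further changes.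
--         if len(engineSetCopy) == 0:  # Covers the case where we had to transition on last element
--             return 1
--         return 0
--     return 1 + bestEngine(QueryArray, startIndex-1, EngineSet)  # Otherwise increment the transitions call recursively
-- ===== SOURCE B (Python) =====
-- def bestEngine(QueryArray, startIndex, EngineSet):
--     # One pass, no recursion and no re-scan: when the engine set empties at query q,
--     # count a switch and continue with a fresh set minus q (exactly what A's restart
--     # at startIndex-1 achieves by re-reading q with a full set).
--     full = set(EngineSet)
--     switches = 0
--     cur = set(full)
--     for i in range(startIndex, len(QueryArray)):
--         q = QueryArray[i]
--         if q in cur: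
--             cur.remove(q)
--             if not cur:
--                 switches += 1
--                 cur = set(full)
--                 cur.discard(q)
--     return switches + (1 if not full else 0)
-- ===== Notes on version B (the rewrite author's own statement) =====
-- stated objective: simpler
-- what changed: A's recursive restart (re-scan from startIndex-1 with a fresh engine set on every emptying) is replaced by a single non-recursive left-to-right pass that, when the set empties at query q, counts one switch and continues with a fresh set minus q.
-- outside the precondition, e.g. on bestEngine(['a'], 3, {'b', 'a'}): A returns 2, B returns 0
import Mathlib
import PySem

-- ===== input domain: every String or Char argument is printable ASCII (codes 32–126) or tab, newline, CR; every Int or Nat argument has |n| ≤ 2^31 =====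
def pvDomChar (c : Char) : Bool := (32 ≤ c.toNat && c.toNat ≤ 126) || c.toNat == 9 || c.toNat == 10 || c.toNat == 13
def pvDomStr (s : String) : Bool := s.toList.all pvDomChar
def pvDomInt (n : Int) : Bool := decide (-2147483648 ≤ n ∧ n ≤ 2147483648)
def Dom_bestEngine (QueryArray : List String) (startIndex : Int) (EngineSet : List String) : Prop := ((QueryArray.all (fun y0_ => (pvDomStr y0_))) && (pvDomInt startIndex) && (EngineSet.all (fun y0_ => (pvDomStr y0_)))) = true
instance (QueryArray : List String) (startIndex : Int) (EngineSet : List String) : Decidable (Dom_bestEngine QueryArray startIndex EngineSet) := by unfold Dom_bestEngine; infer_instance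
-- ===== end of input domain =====

-- B replaces A's recursive restart with one non-recursive pass that resets the engine
-- set in place when it empties; same value on Pre_ (objective: simpler — no recursion, no re-scan).

-- ===== PORT A =====
-- A's inner `while` loop; the fuel argument only makes the loop total (it is bounded
-- by the number of remaining iterations on every input Pre_ admits).
def pvScanA (arr : List String) : Nat → Int → PySem.Set String → Int × PySem.Set String
  | 0, i, cur => (i, cur)
  | f+1, i, cur =>
      if i < (arr.length : Int) ∧ cur ≠ [] then
        let q := (PySem.List.pyGet? arr i).getD ""
        pvScanA arr f (i+1)
          (if PySem.Set.contains cur q then (PySem.Set.remove? cur q).getD cur else cur)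
      else (i, cur)

-- A's recursion on `1 + bestEngine(QueryArray, startIndex-1, EngineSet)`; fuel again
-- only makes the (on Pre_ always terminating) recursion total.
def pvBestAux (arr : List String) (EngineSet : List String) : Nat → Int → Int
  | 0, _ => 0
  | f+1, startIndex =>
      let r := pvScanA arr (2*arr.length+2) startIndex (PySem.Set.ofList EngineSet)
      if r.1 = (arr.length : Int) then (if r.2 = [] then 1 else 0)
      else 1 + pvBestAux arr EngineSet f (r.1 - 1)

def bestEngine (QueryArray : List String) (startIndex : Int) (EngineSet : List String) : Int :=
  pvBestAux QueryArray EngineSet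
    (2*QueryArray.length + 1 + (startIndex - (QueryArray.length : Int)).toNat + 1) startIndex

-- ===== PORT B =====
-- the body of B's single `for i in range(startIndex, len(QueryArray))` loop
def pvStepB (arr : List String) (full : PySem.Set String) (st : Int × PySem.Set String) (i : Int) : Int × PySem.Set String :=
  let q := (PySem.List.pyGet? arr i).getD ""
  if PySem.Set.contains st.2 q then
    let c := (PySem.Set.remove? st.2 q).getD st.2
    if c = [] then (st.1 + 1, PySem.Set.discard full q) else (st.1, c)
  else st

def bestEngine_alt (QueryArray : List String) (startIndex : Int) (EngineSet : List String) : Int :=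
  let full := PySem.Set.ofList EngineSet
  let r := (PySem.List.pyRange startIndex (QueryArray.length : Int) 1).foldl (pvStepB QueryArray full) (0, full)
  r.1 + (if full = [] then 1 else 0)

-- ===== PRECONDITION & SPEC =====
-- the queries A's loop reads, in the order it reads them (Python indices start..len-1,
-- negative indices wrapping)
def pvScanned (arr : List String) (start : Int) : List String :=
  (PySem.List.pyRange start (arr.length : Int) 1).map (fun i => (PySem.List.pyGet? arr i).getD "")

-- Pre_ restricts to the natural domain -len ≤ startIndex ≤ len (below it A raises
-- IndexError; above it a start index past the end of the array is outside the
-- function's meaningful domain: A then counts one phantom switch per step back to the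
-- end) and excludes the inputs on which A's recursion never terminates
-- (RecursionError): an empty distinct engine set with queries left to scan, or
-- exactly one distinct engine that occurs among the scanned queries before the last one.
def Pre_bestEngine (QueryArray : List String) (startIndex : Int) (EngineSet : List String) : Prop :=
  -(QueryArray.length : Int) ≤ startIndex ∧ startIndex ≤ (QueryArray.length : Int) ∧
  (PySem.Set.ofList EngineSet = [] → startIndex = (QueryArray.length : Int)) ∧
  ((PySem.Set.ofList EngineSet).length = 1 →
    (PySem.Set.ofList EngineSet).headD "" ∉ (pvScanned QueryArray startIndex).dropLast)
instance (QueryArray : List String) (startIndex : Int) (EngineSet : List String) : Decidable (Pre_bestEngine QueryArray startIndex EngineSet) := by unfold Pre_bestEngine; infer_instance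

def pvWitness_bestEngine : List String × Int × List String := (["a", "b", "a"], 0, ["a", "b"])

def Spec_bestEngine (QueryArray : List String) (startIndex : Int) (EngineSet : List String) (out : Int) : Prop := out = bestEngine_alt QueryArray startIndex EngineSet
instance (QueryArray : List String) (startIndex : Int) (EngineSet : List String) (out : Int) : Decidable (Spec_bestEngine QueryArray startIndex EngineSet out) := by unfold Spec_bestEngine; infer_instance

-- ===== CLAIM (what is proved, stated in full; the proofs are below) =====
def Claim_equal_bestEngine : Prop := ∀ (QueryArray : List String) (startIndex : Int) (EngineSet : List String), Dom_bestEngine QueryArray startIndex EngineSet → Pre_bestEngine QueryArray startIndex EngineSet → Spec_bestEngine QueryArray startIndex EngineSet (bestEngine QueryArray startIndex EngineSet)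

-- ===== LEMMAS AND PROOFS =====

lemma pvScanA_exit (arr : List String) (f : Nat) (i : Int) (cur : PySem.Set String)
    (h : ¬((i < (arr.length : Int)) ∧ cur ≠ [])) : pvScanA arr f i cur = (i, cur) := by
  cases f with
  | zero => rfl
  | succ f => simp only [pvScanA, if_neg h]

lemma pvScanA_step (arr : List String) (f : Nat) (i : Int) (cur : PySem.Set String)
    (h : (i < (arr.length : Int)) ∧ cur ≠ []) :
    pvScanA arr (f+1) i cur = pvScanA arr f (i+1)
      (if PySem.Set.contains cur ((PySem.List.pyGet? arr i).getD "") then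
        (PySem.Set.remove? cur ((PySem.List.pyGet? arr i).getD "")).getD cur else cur) := by
  simp only [pvScanA, if_pos h]

lemma pvScanA_fuel (arr : List String) (f : Nat) :
    ∀ (g : Nat) (i : Int) (cur : PySem.Set String),
    ((arr.length : Int) - i).toNat ≤ f → ((arr.length : Int) - i).toNat ≤ g →
    pvScanA arr f i cur = pvScanA arr g i cur := by
  induction f with
  | zero =>
    intro g i cur hf hg
    have hi : ¬((i < (arr.length : Int)) ∧ cur ≠ []) := by
      intro h; omega
    rw [pvScanA_exit arr 0 i cur hi, pvScanA_exit arr g i cur hi]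
  | succ f ih =>
    intro g i cur hf hg
    by_cases hc : (i < (arr.length : Int)) ∧ cur ≠ []
    · obtain ⟨g', rfl⟩ : ∃ g', g = g' + 1 := by
        cases g with
        | zero => exfalso; omega
        | succ g' => exact ⟨g', rfl⟩
      rw [pvScanA_step arr f i cur hc, pvScanA_step arr g' i cur hc]
      exact ih g' (i+1) _ (by omega) (by omega)
    · rw [pvScanA_exit arr _ i cur hc, pvScanA_exit arr g i cur hc]

lemma pvScanA_ge (arr : List String) (f : Nat) :
    ∀ (i : Int) (cur : PySem.Set String), i ≤ (pvScanA arr f i cur).1 := by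
  induction f with
  | zero => intro i cur; exact le_refl i
  | succ f ih =>
    intro i cur
    by_cases hc : (i < (arr.length : Int)) ∧ cur ≠ []
    · rw [pvScanA_step arr f i cur hc]
      have := ih (i+1) (if PySem.Set.contains cur ((PySem.List.pyGet? arr i).getD "") then
        (PySem.Set.remove? cur ((PySem.List.pyGet? arr i).getD "")).getD cur else cur)
      omega
    · rw [pvScanA_exit arr _ i cur hc]

lemma pvScanA_le (arr : List String) (f : Nat) :
    ∀ (i : Int) (cur : PySem.Set String), i ≤ (arr.length : Int) →
    (pvScanA arr f i cur).1 ≤ (arr.length : Int) := by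
  induction f with
  | zero => intro i cur h; exact h
  | succ f ih =>
    intro i cur h
    by_cases hc : (i < (arr.length : Int)) ∧ cur ≠ []
    · rw [pvScanA_step arr f i cur hc]; exact ih (i+1) _ (by omega)
    · rw [pvScanA_exit arr _ i cur hc]; exact h

lemma pvScanA_complete (arr : List String) (f : Nat) :
    ∀ (i : Int) (cur : PySem.Set String), i ≤ (arr.length : Int) →
    ((arr.length : Int) - i).toNat ≤ f →
    (pvScanA arr f i cur).1 = (arr.length : Int) ∨ (pvScanA arr f i cur).2 = [] := by
  induction f with
  | zero =>
    intro i cur hi hf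
    have : i = (arr.length : Int) := by omega
    left; rw [pvScanA_exit arr 0 i cur (by intro h; omega)]; exact this
  | succ f ih =>
    intro i cur hi hf
    by_cases hc : (i < (arr.length : Int)) ∧ cur ≠ []
    · rw [pvScanA_step arr f i cur hc]; exact ih (i+1) _ (by omega) (by omega)
    · rw [pvScanA_exit arr _ i cur hc]
      rcases not_and_or.mp hc with h | h
      · left; omega
      · right; simpa using h

lemma pvScanA_progress (arr : List String) (f : Nat) :
    ∀ (i : Int) (cur : PySem.Set String), cur ≠ [] → (pvScanA arr f i cur).2 = [] →
    i + 1 ≤ (pvScanA arr f i cur).1 := by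
  induction f with
  | zero => intro i cur hc he; exact absurd he hc
  | succ f ih =>
    intro i cur hc he
    by_cases hcond : (i < (arr.length : Int)) ∧ cur ≠ []
    · rw [pvScanA_step arr f i cur hcond]
      exact pvScanA_ge arr f (i+1) _
    · rw [pvScanA_exit arr _ i cur hcond] at he ⊢
      exact absurd he hc

lemma pv_remove_getD (s : PySem.Set String) (q : String)
    (h : PySem.Set.contains s q = true) :
    (PySem.Set.remove? s q).getD s = PySem.Set.discard s q := by
  have hm : q ∈ s := by simpa [PySem.Set.contains] using h
  simp [PySem.Set.remove?, PySem.Set.contains, hm]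

lemma pv_discard_branch (s : PySem.Set String) (q : String) :
    (if PySem.Set.contains s q then (PySem.Set.remove? s q).getD s else s)
      = PySem.Set.discard s q := by
  by_cases h : PySem.Set.contains s q
  · rw [if_pos h]; exact pv_remove_getD s q h
  · rw [if_neg h]
    have hq : q ∉ s := by
      intro hm
      exact h (by simpa [PySem.Set.contains] using hm)
    unfold PySem.Set.discard
    symm
    rw [List.filter_eq_self]
    intro y hy
    simp only [Bool.not_eq_eq_eq_not, Bool.not_true, beq_eq_false_iff_ne, ne_eq]
    intro heq; exact hq (heq ▸ hy)

lemma pvStepB_hit_nil (arr : List String) (full cur : PySem.Set String) (sw i : Int)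
    (hq : PySem.Set.contains cur ((PySem.List.pyGet? arr i).getD "") = true)
    (hnil : PySem.Set.discard cur ((PySem.List.pyGet? arr i).getD "") = []) :
    pvStepB arr full (sw, cur) i
      = (sw + 1, PySem.Set.discard full ((PySem.List.pyGet? arr i).getD "")) := by
  simp only [pvStepB, pv_remove_getD cur _ hq, hq, hnil, if_true]

lemma pvStepB_hit (arr : List String) (full cur : PySem.Set String) (sw i : Int)
    (hq : PySem.Set.contains cur ((PySem.List.pyGet? arr i).getD "") = true)
    (hnil : PySem.Set.discard cur ((PySem.List.pyGet? arr i).getD "") ≠ []) :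
    pvStepB arr full (sw, cur) i
      = (sw, PySem.Set.discard cur ((PySem.List.pyGet? arr i).getD "")) := by
  simp only [pvStepB, pv_remove_getD cur _ hq, hq, if_true]
  simp [hnil]

lemma pvStepB_miss (arr : List String) (full cur : PySem.Set String) (sw i : Int)
    (hq : ¬ PySem.Set.contains cur ((PySem.List.pyGet? arr i).getD "") = true) :
    pvStepB arr full (sw, cur) i = (sw, cur) := by
  have hm : (PySem.List.pyGet? arr i).getD "" ∉ cur := by
    simpa [PySem.Set.contains] using hq
  simp [pvStepB, hm]

lemma pv_discard_ne_nil (s : PySem.Set String) (q : String)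
    (hn : s.Nodup) (h2 : 2 ≤ s.length) : PySem.Set.discard s q ≠ [] := by
  match s, h2 with
  | a :: b :: t, _ =>
    intro hnil
    unfold PySem.Set.discard at hnil
    rw [List.filter_eq_nil_iff] at hnil
    have ha := hnil a (by simp)
    have hb := hnil b (by simp)
    simp only [Bool.not_eq_eq_eq_not, Bool.not_true, beq_eq_false_iff_ne, ne_eq,
      not_not] at ha hb
    have hab : a ≠ b := by
      have := List.nodup_cons.mp hn
      simp only [List.mem_cons] at this
      exact fun h => this.1 (Or.inl h)
    exact hab (ha.trans hb.symm)

-- B's fold simulates A's scan until the set empties, then carries the reset state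
lemma pv_simB (arr : List String) (full : PySem.Set String) (f : Nat) :
    ∀ (i : Int) (cur : PySem.Set String) (sw : Int),
    ((arr.length : Int) - i).toNat ≤ f → cur ≠ [] →
    (PySem.List.pyRange i (arr.length : Int) 1).foldl (pvStepB arr full) (sw, cur) =
      (if (pvScanA arr f i cur).2 = [] then
        (PySem.List.pyRange (pvScanA arr f i cur).1 (arr.length : Int) 1).foldl (pvStepB arr full)
          (sw + 1, PySem.Set.discard full ((PySem.List.pyGet? arr ((pvScanA arr f i cur).1 - 1)).getD ""))
      else (sw, (pvScanA arr f i cur).2)) := by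
  induction f with
  | zero =>
    intro i cur sw hf hc
    rw [pvScanA_exit arr 0 i cur (by intro h; omega)]
    simp only [if_neg hc]
    rw [PySem.List.pyRange_one_eq_nil (by omega)]
    rfl
  | succ f ih =>
    intro i cur sw hf hc
    by_cases hcond : (i < (arr.length : Int)) ∧ cur ≠ []
    · rw [pvScanA_step arr f i cur hcond, pv_discard_branch cur]
      rw [PySem.List.pyRange_one_cons hcond.1, List.foldl_cons]
      by_cases hq : PySem.Set.contains cur ((PySem.List.pyGet? arr i).getD "") = true
      · by_cases hnil : PySem.Set.discard cur ((PySem.List.pyGet? arr i).getD "") = []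
        · -- the set empties at index i
          rw [pvStepB_hit_nil arr full cur sw i hq hnil, hnil]
          rw [pvScanA_exit arr f (i+1) [] (by simp)]
          norm_num
        · -- an engine is removed, the set stays non-empty
          rw [pvStepB_hit arr full cur sw i hq hnil]
          exact ih (i+1) _ sw (by omega) hnil
      · rw [pvStepB_miss arr full cur sw i hq]
        have hsame : PySem.Set.discard cur ((PySem.List.pyGet? arr i).getD "") = cur := by
          rw [← pv_discard_branch cur _, if_neg hq]
        rw [hsame]
        exact ih (i+1) cur sw (by omega) hc
    · rw [pvScanA_exit arr _ i cur hcond]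
      simp only [if_neg hc]
      have : ¬ i < (arr.length : Int) := by
        rcases not_and_or.mp hcond with h | h
        · exact h
        · exact absurd (by simpa using h) hc
      rw [PySem.List.pyRange_one_eq_nil (by omega)]
      rfl

-- main invariant for the case of at least two distinct engines
lemma pv_main (arr : List String) (S : List String)
    (h2 : 2 ≤ (PySem.Set.ofList S).length) (f : Nat) :
    ∀ (i sw : Int) (cur : PySem.Set String),
    -(arr.length : Int) ≤ i → i ≤ (arr.length : Int) →
    ((arr.length : Int) - i).toNat ≤ f → cur ≠ [] →
    (if (pvScanA arr (2*arr.length+2) i cur).1 = (arr.length : Int) then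
      sw + (if (pvScanA arr (2*arr.length+2) i cur).2 = [] then 1 else 0)
    else sw + (1 + pvBestAux arr S f ((pvScanA arr (2*arr.length+2) i cur).1 - 1)))
      = ((PySem.List.pyRange i (arr.length : Int) 1).foldl
          (pvStepB arr (PySem.Set.ofList S)) (sw, cur)).1 := by
  induction f with
  | zero =>
    intro i sw cur hlo hhi hf hc
    have hiL : i = (arr.length : Int) := by omega
    rw [pvScanA_exit arr _ i cur (by intro h; omega)]
    simp only [hiL, if_neg hc]
    rw [PySem.List.pyRange_one_eq_nil (by omega)]
    norm_num
  | succ f ih =>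
    intro i sw cur hlo hhi hf hc
    have hfSF : ((arr.length : Int) - i).toNat ≤ 2*arr.length+2 := by omega
    rw [pv_simB arr (PySem.Set.ofList S) (2*arr.length+2) i cur sw hfSF hc]
    by_cases hemp : (pvScanA arr (2*arr.length+2) i cur).2 = []
    · set j := (pvScanA arr (2*arr.length+2) i cur).1 with hjdef
      have hj1 : i + 1 ≤ j := pvScanA_progress arr _ i cur hc hemp
      have hjL : j ≤ (arr.length : Int) := pvScanA_le arr _ i cur hhi
      simp only [if_pos hemp]
      by_cases hjend : j = (arr.length : Int)
      · simp only [hjend]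
        rw [PySem.List.pyRange_one_eq_nil (le_refl _)]
        norm_num
      · simp only [if_neg hjend]
        -- unfold one level of A's recursion at j-1
        have hcond : ((j-1 : Int) < (arr.length : Int)) ∧ (PySem.Set.ofList S) ≠ [] := by
          constructor
          · omega
          · intro h; rw [h] at h2; simp at h2
        have hq' : pvBestAux arr S (f+1) (j-1)
            = (if (pvScanA arr (2*arr.length+2) (j-1) (PySem.Set.ofList S)).1 = (arr.length : Int) then
                (if (pvScanA arr (2*arr.length+2) (j-1) (PySem.Set.ofList S)).2 = [] then 1 else 0)
              else 1 + pvBestAux arr S f ((pvScanA arr (2*arr.length+2) (j-1) (PySem.Set.ofList S)).1 - 1)) := by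
          simp only [pvBestAux]
        have hunf : pvScanA arr (2*arr.length+2) (j-1) (PySem.Set.ofList S)
            = pvScanA arr (2*arr.length+2) j
                (PySem.Set.discard (PySem.Set.ofList S) ((PySem.List.pyGet? arr (j-1)).getD "")) := by
          rw [show (2*arr.length+2) = (2*arr.length+1)+1 from rfl,
            pvScanA_step arr (2*arr.length+1) (j-1) (PySem.Set.ofList S) hcond,
            pv_discard_branch]
          have h1 : (j - 1) + 1 = j := by omega
          rw [h1]
          exact pvScanA_fuel arr (2*arr.length+1) (2*arr.length+2) j _ (by omega) (by omega)
        set cur0 := PySem.Set.discard (PySem.Set.ofList S) ((PySem.List.pyGet? arr (j-1)).getD "") with hc0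
        have hcur0 : cur0 ≠ [] :=
          pv_discard_ne_nil _ _ (PySem.Set.nodup_ofList S) h2
        have := ih j (sw+1) cur0 (by omega) hjL (by omega) hcur0
        rw [← this, hq', hunf]
        split_ifs <;> ring
    · simp only [if_neg hemp]
      have hj := pvScanA_complete arr (2*arr.length+2) i cur hhi hfSF
      have hjL : (pvScanA arr (2*arr.length+2) i cur).1 = (arr.length : Int) := by
        rcases hj with h | h
        · exact h
        · exact absurd h hemp
      simp only [hjL]
      norm_num

-- when the engine set is the singleton [e], a scan that empties it has just read e
lemma pv_scan_sing_hit (arr : List String) (e : String) (f : Nat) :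
    ∀ (i : Int), (pvScanA arr f i [e]).2 = [] →
      (PySem.List.pyGet? arr ((pvScanA arr f i [e]).1 - 1)).getD "" = e := by
  induction f with
  | zero => intro i h; simp [pvScanA] at h
  | succ f ih =>
    intro i h
    by_cases hcond : (i < (arr.length : Int)) ∧ ([e] : PySem.Set String) ≠ []
    · rw [pvScanA_step arr f i [e] hcond] at h ⊢
      set q := (PySem.List.pyGet? arr i).getD "" with hq
      by_cases hmem : PySem.Set.contains ([e] : PySem.Set String) q
      · have hqe : q = e := by
          simpa [PySem.Set.contains] using hmem
        have hrm : (if PySem.Set.contains ([e] : PySem.Set String) q then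
            (PySem.Set.remove? ([e] : PySem.Set String) q).getD [e] else [e]) = ([] : PySem.Set String) := by
          rw [pv_discard_branch]
          simp [PySem.Set.discard, hqe]
        rw [hrm] at h ⊢
        rw [pvScanA_exit arr f (i+1) [] (by simp)]
        simp only []
        rw [show i + 1 - 1 = i from by omega, ← hq, hqe]
      · have hrm : (if PySem.Set.contains ([e] : PySem.Set String) q then
            (PySem.Set.remove? ([e] : PySem.Set String) q).getD [e] else [e]) = ([e] : PySem.Set String) := by
          rw [if_neg hmem]
        rw [hrm] at h ⊢
        exact ih (i+1) h
    · rw [pvScanA_exit arr _ i [e] hcond] at h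
      simp at h

lemma pv_dropLast_scanned (arr : List String) (start : Int)
    (h1 : start < (arr.length : Int)) :
    (pvScanned arr start).dropLast
      = (PySem.List.pyRange start ((arr.length : Int) - 1) 1).map
          (fun i => (PySem.List.pyGet? arr i).getD "") := by
  unfold pvScanned
  rw [show (arr.length : Int) = ((arr.length : Int) - 1) + 1 from by omega,
    PySem.List.pyRange_one_succ_right (by omega), List.map_append]
  simp

-- ===== VERDICT (by name: the statement is the Claim_ definition above) =====
theorem bestEngine_spec : Claim_equal_bestEngine := by
  intro arr start S _hdom hpre
  obtain ⟨hlo, hhi, hemp, hsing⟩ := hpre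
  unfold Spec_bestEngine bestEngine bestEngine_alt
  simp only []
  by_cases h0 : PySem.Set.ofList S = []
  · -- no engines at all: Pre_ forces start = len, both sides return 1
    have hstart : start = (arr.length : Int) := hemp h0
    rw [pvBestAux, h0]
    rw [pvScanA_exit arr _ start [] (by simp), hstart]
    rw [PySem.List.pyRange_one_eq_nil (le_refl _)]
    simp
  · by_cases h1 : (PySem.Set.ofList S).length = 1
    · -- exactly one distinct engine
      obtain ⟨e, hfull⟩ := List.length_eq_one_iff.mp h1
      have hsing' : e ∉ (pvScanned arr start).dropLast := by
        have := hsing h1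
        rwa [hfull] at this
      rw [pvBestAux, hfull]
      have hfSF : ((arr.length : Int) - start).toNat ≤ 2*arr.length+2 := by omega
      rw [pv_simB arr [e] (2*arr.length+2) start [e] 0 hfSF (by simp)]
      by_cases hempty : (pvScanA arr (2*arr.length+2) start [e]).2 = []
      · -- the scan empties the singleton: Pre_ forces this at the very last query
        have hj1 : start + 1 ≤ (pvScanA arr (2*arr.length+2) start [e]).1 :=
          pvScanA_progress arr _ start [e] (by simp) hempty
        have hjL : (pvScanA arr (2*arr.length+2) start [e]).1 ≤ (arr.length : Int) :=
          pvScanA_le arr _ start [e] hhi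
        have hjend : (pvScanA arr (2*arr.length+2) start [e]).1 = (arr.length : Int) := by
          by_contra hne
          have hhit := pv_scan_sing_hit arr e (2*arr.length+2) start hempty
          have hmem : e ∈ (pvScanned arr start).dropLast := by
            rw [pv_dropLast_scanned arr start (by omega)]
            exact List.mem_map.mpr ⟨(pvScanA arr (2*arr.length+2) start [e]).1 - 1,
              PySem.List.mem_pyRange_one.mpr ⟨by omega, by omega⟩, hhit⟩
          exact hsing' hmem
        simp only [if_pos hempty, hjend]
        rw [PySem.List.pyRange_one_eq_nil (le_refl _)]
        simp
      · have hj := pvScanA_complete arr (2*arr.length+2) start [e] hhi hfSF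
        have hjL : (pvScanA arr (2*arr.length+2) start [e]).1 = (arr.length : Int) := by
          rcases hj with h | h
          · exact h
          · exact absurd h hempty
        simp only [if_neg hempty, hjL]
        simp
    · -- at least two distinct engines: the main invariant
      have hlen0 : (PySem.Set.ofList S).length ≠ 0 := by
        intro h; exact h0 (List.length_eq_zero_iff.mp h)
      have h2 : 2 ≤ (PySem.Set.ofList S).length := by omega
      have hmain := pv_main arr S h2
        (2*arr.length + 1 + (start - (arr.length : Int)).toNat) start 0 (PySem.Set.ofList S)
        hlo hhi (by omega) h0
      rw [pvBestAux]
      rw [← hmain]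
      simp only [if_neg h0, add_zero]
      split_ifs <;> ring
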